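-- pv_equiv track=rewrite | github.com/xfanuu/Machine-Learning-Diabete | MyClassifier.py | createTrainingDataset
-- ===== SOURCE A (Python) =====
-- def createTrainingDataset(trainingdata):
--     attribute = {}
--     dataset = []
--     for i in range(len(trainingdata)):
--         attribute[i] = trainingdata[i][0:].split(',')
--         dataset.append(attribute[i])
--
--     trainingDatasetYes = []
--     trainingDatasetNo = []
--
--     for example in dataset:
--         if example[-1] == 'yes':
--             trainingDatasetYes.append(example)
--         elif example[-1] == 'no':
--             trainingDatasetNo.append(example)
--     tempY =  [x[:] for x in trainingDatasetYes]
--     for e in tempY: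
--         e.pop()
--         trainingDatasetYes = tempY
--     tempN =  [x[:] for x in trainingDatasetNo]
--     for e in tempN:
--         e.pop()
--         trainingDatasetNo = tempN
--
--     return trainingDatasetYes, trainingDatasetNo
-- ===== SOURCE B (Python) =====
-- def createTrainingDataset(trainingdata):
--     # Single pass: split each row once, dispatch on the label, store fields minus label.
--     yes, no = [], []
--     for row in trainingdata:
--         fields = row.split(',')
--         label = fields[-1]
--         if label == 'yes':
--             yes.append(fields[:-1])
--         elif label == 'no':
--             no.append(fields[:-1])
--     return yes, no
-- ===== Notes on version B (the rewrite author's own statement) =====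
-- stated objective: simpler
-- what changed: One pass over the rows appending fields[:-1] directly to the yes/no list, replacing A's attribute dict + dataset list, the separate classification pass and the two copy-then-pop passes.
import Mathlib
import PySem

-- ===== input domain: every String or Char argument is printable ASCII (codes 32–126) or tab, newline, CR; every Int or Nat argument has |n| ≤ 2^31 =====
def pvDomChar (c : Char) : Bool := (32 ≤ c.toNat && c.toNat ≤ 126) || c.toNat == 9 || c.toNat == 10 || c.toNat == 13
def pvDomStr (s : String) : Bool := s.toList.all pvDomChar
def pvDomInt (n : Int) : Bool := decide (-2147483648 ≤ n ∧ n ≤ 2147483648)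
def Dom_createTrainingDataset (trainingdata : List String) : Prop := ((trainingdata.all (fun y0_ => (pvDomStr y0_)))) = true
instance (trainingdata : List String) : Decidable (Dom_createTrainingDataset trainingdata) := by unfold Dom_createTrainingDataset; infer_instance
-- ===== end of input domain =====

-- B replaces A's dict + dataset list, separate classification pass and two copy-then-pop passes
-- by a single pass appending fields[:-1]; same return value (simpler, not claimed faster).

-- ===== PORT A =====
def createTrainingDataset (trainingdata : List String) : List (List String) × List (List String) :=
  -- for i in range(len(trainingdata)): attribute[i] = trainingdata[i][0:].split(','); dataset.append(attribute[i])
  -- (trainingdata[i] is in range for every i of the range, so pyGetD's default "" is unreachable)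
  let st := (PySem.List.pyRange 0 (PySem.List.len trainingdata) 1).foldl
    (fun (st : PySem.Dict Int (List String) × List (List String)) i =>
      let attr := st.1.insert i ((PySem.Str.split? (PySem.Str.slice (PySem.List.pyGetD trainingdata i "") (some 0) none) ",").getD [])
      (attr, st.2 ++ [PySem.Dict.getD attr i []]))
    (PySem.Dict.empty, [])
  let dataset := st.2
  -- for example in dataset: if example[-1]=='yes' … elif example[-1]=='no' …
  let p := dataset.foldl
    (fun (acc : List (List String) × List (List String)) ex =>
      if PySem.List.pyGet? ex (-1) = some "yes" then (acc.1 ++ [ex], acc.2)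
      else if PySem.List.pyGet? ex (-1) = some "no" then (acc.1, acc.2 ++ [ex])
      else acc)
    ([], [])
  -- tempY = [x[:] for x in ...]; for e in tempY: e.pop(); copy-then-pop() of a nonempty list
  -- drops its last element (split(',') never returns [], so pop never raises): exact as dropLast
  (p.1.map (fun x => x.dropLast), p.2.map (fun x => x.dropLast))

-- ===== PORT B =====
def createTrainingDataset_alt (trainingdata : List String) : List (List String) × List (List String) :=
  trainingdata.foldl
    (fun (acc : List (List String) × List (List String)) row =>
      let fields := (PySem.Str.split? row ",").getD []
      -- fields[-1]: split(',') never returns [], so the getD default "" is unreachable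
      let label := (PySem.List.pyGet? fields (-1)).getD ""
      if label = "yes" then (acc.1 ++ [PySem.List.slice fields none (some (-1))], acc.2)
      else if label = "no" then (acc.1, acc.2 ++ [PySem.List.slice fields none (some (-1))])
      else acc)
    ([], [])

-- ===== PRECONDITION & SPEC =====
def Spec_createTrainingDataset (trainingdata : List String) (out : List (List String) × List (List String)) : Prop := out = createTrainingDataset_alt trainingdata
instance (trainingdata : List String) (out : List (List String) × List (List String)) : Decidable (Spec_createTrainingDataset trainingdata out) := by unfold Spec_createTrainingDataset; infer_instance

-- ===== CLAIM (what is proved, stated in full; the proofs are below) =====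
def Claim_equal_createTrainingDataset : Prop := ∀ (trainingdata : List String), Dom_createTrainingDataset trainingdata → Spec_createTrainingDataset trainingdata (createTrainingDataset trainingdata)

-- ===== LEMMAS AND PROOFS =====

-- helper naming A's per-row computation (proof-only)
def pvF (s : String) : List String :=
  (PySem.Str.split? (PySem.Str.slice s (some 0) none) ",").getD []

theorem pv_slice0 (s : String) : PySem.Str.slice s (some 0) none = s := by
  unfold PySem.Str.slice
  simp [pysem]

theorem pvF_eq (s : String) : pvF s = (PySem.Str.split? s ",").getD [] := by
  rw [pvF, pv_slice0]

theorem pv_getD_yes (o : Option String) : (o.getD "" = "yes") ↔ o = some "yes" := by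
  cases o <;> simp

theorem pv_getD_no (o : Option String) : (o.getD "" = "no") ↔ o = some "no" := by
  cases o <;> simp

-- the first loop's dataset component is the map of per-row splits
theorem pv_fold1 (idxs : List Int) (g : Int → List String)
    (d : PySem.Dict Int (List String)) (acc : List (List String)) :
    (idxs.foldl (fun st i => (st.1.insert i (g i), st.2 ++ [g i])) (d, acc)).2
      = acc ++ idxs.map g := by
  induction idxs generalizing d acc with
  | nil => simp
  | cons i t ih => simp [List.foldl_cons, ih]

-- classify-then-strip over the split rows equals B's single strip-as-you-go pass
theorem pv_fold2 (l : List String) (a b : List (List String)) :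
    ((((l.map pvF).foldl
        (fun (acc : List (List String) × List (List String)) ex =>
          if PySem.List.pyGet? ex (-1) = some "yes" then (acc.1 ++ [ex], acc.2)
          else if PySem.List.pyGet? ex (-1) = some "no" then (acc.1, acc.2 ++ [ex])
          else acc) (a, b)).1.map (fun x => x.dropLast)),
     (((l.map pvF).foldl
        (fun (acc : List (List String) × List (List String)) ex =>
          if PySem.List.pyGet? ex (-1) = some "yes" then (acc.1 ++ [ex], acc.2)
          else if PySem.List.pyGet? ex (-1) = some "no" then (acc.1, acc.2 ++ [ex])
          else acc) (a, b)).2.map (fun x => x.dropLast)))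
    = l.foldl
        (fun (acc : List (List String) × List (List String)) row =>
          let fields := (PySem.Str.split? row ",").getD []
          let label := (PySem.List.pyGet? fields (-1)).getD ""
          if label = "yes" then (acc.1 ++ [PySem.List.slice fields none (some (-1))], acc.2)
          else if label = "no" then (acc.1, acc.2 ++ [PySem.List.slice fields none (some (-1))])
          else acc)
        (a.map (fun x => x.dropLast), b.map (fun x => x.dropLast)) := by
  have hstep : (fun (acc : List (List String) × List (List String)) row =>
        let fields := (PySem.Str.split? row ",").getD []
        let label := (PySem.List.pyGet? fields (-1)).getD ""
        if label = "yes" then (acc.1 ++ [PySem.List.slice fields none (some (-1))], acc.2)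
        else if label = "no" then (acc.1, acc.2 ++ [PySem.List.slice fields none (some (-1))])
        else acc)
      = (fun (acc : List (List String) × List (List String)) row =>
          if PySem.List.pyGet? (pvF row) (-1) = some "yes" then (acc.1 ++ [(pvF row).dropLast], acc.2)
          else if PySem.List.pyGet? (pvF row) (-1) = some "no" then (acc.1, acc.2 ++ [(pvF row).dropLast])
          else acc) := by
    funext acc row
    simp only [← pvF_eq, pv_getD_yes, pv_getD_no, PySem.List.slice_to_neg_one]
  rw [hstep]
  induction l generalizing a b with
  | nil => simp
  | cons r t ih =>
    simp only [List.map_cons, List.foldl_cons]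
    by_cases hy : PySem.List.pyGet? (pvF r) (-1) = some "yes"
    · rw [if_pos hy, if_pos hy, ih]
      simp
    · rw [if_neg hy, if_neg hy]
      by_cases hn : PySem.List.pyGet? (pvF r) (-1) = some "no"
      · rw [if_pos hn, if_pos hn, ih]
        simp
      · rw [if_neg hn, if_neg hn, ih]

-- ===== VERDICT (by name: the statement is the Claim_ definition above) =====
set_option maxHeartbeats 1000000 in
theorem createTrainingDataset_spec : Claim_equal_createTrainingDataset := by
  intro td _
  unfold Spec_createTrainingDataset createTrainingDataset createTrainingDataset_alt
  have hfn : (fun (st : PySem.Dict Int (List String) × List (List String)) i =>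
      let attr := st.1.insert i ((PySem.Str.split? (PySem.Str.slice (PySem.List.pyGetD td i "") (some 0) none) ",").getD [])
      (attr, st.2 ++ [PySem.Dict.getD attr i []]))
      = (fun (st : PySem.Dict Int (List String) × List (List String)) i =>
          (st.1.insert i (pvF (PySem.List.pyGetD td i "")),
           st.2 ++ [pvF (PySem.List.pyGetD td i "")])) := by
    funext st i
    simp [pysem, pvF]
  simp only [hfn]
  rw [pv_fold1, List.nil_append]
  have hmap : (PySem.List.pyRange 0 (PySem.List.len td) 1).map
      (fun i => pvF (PySem.List.pyGetD td i "")) = td.map pvF := by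
    have h1 : (fun i => pvF (PySem.List.pyGetD td i ""))
        = pvF ∘ (fun i => PySem.List.pyGetD td i "") := rfl
    rw [h1, ← List.map_map, PySem.List.map_pyGetD_pyRange_zero]
  rw [hmap]
  have h2 := pv_fold2 td [] []
  simpa using h2
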